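-- pv_equiv track=rewrite | github.com/dcatlin7921/Snatched-V4 | snatched-v3/snatched/tags.py | group_tags
-- ===== SOURCE A (Python) =====
-- TAG_GROUPS = {
--     "Date & Time": [
--         "EXIF:DateTimeOriginal", "EXIF:CreateDate", "EXIF:ModifyDate",
--         "EXIF:SubSecDateTimeOriginal", "XMP:DateTimeOriginal", "XMP:CreateDate",
--         "QuickTime:CreateDate", "QuickTime:ModifyDate",
--     ],
--     "GPS": [
--         "EXIF:GPSLatitude", "EXIF:GPSLongitude", "EXIF:GPSLatitudeRef",
--         "EXIF:GPSLongitudeRef", "EXIF:GPSAltitude", "EXIF:GPSDateStamp",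
--         "EXIF:GPSTimeStamp", "XMP:GPSLatitude", "XMP:GPSLongitude",
--         "Composite:GPSPosition",
--     ],
--     "Description": [
--         "EXIF:ImageDescription", "XMP:Description", "XMP:Title",
--         "XMP:Subject", "IPTC:Caption-Abstract", "IPTC:ObjectName",
--     ],
--     "Creator": [
--         "XMP:Creator", "EXIF:Artist", "IPTC:By-line",
--         "XMP:Rights", "EXIF:Copyright",
--     ],
--     "Camera": [
--         "EXIF:Make", "EXIF:Model", "EXIF:Software",
--         "EXIF:LensModel", "EXIF:FocalLength",
--     ],
--     "Snatched": [
--         "XMP:ImageUniqueID", "EXIF:ImageUniqueID",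
--     ],
-- }
--
-- def group_tags(flat_tags: dict) -> dict[str, dict]:
--     """Organize flat exiftool output into UI-friendly groups.
--
--     Returns {group_name: {tag_key: value, ...}, ...}
--     plus an "Other" group for uncategorized tags.
--     """
--     # Build reverse lookup: tag_key -> group_name
--     tag_to_group = {}
--     for group, keys in TAG_GROUPS.items():
--         for k in keys:
--             tag_to_group[k] = group
--
--     grouped = {g: {} for g in TAG_GROUPS}
--     grouped["Other"] = {}
--
--     # Skip internal/binary tags
--     skip_prefixes = ("SourceFile", "File:", "ExifTool:")
--
--     for key, val in flat_tags.items():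
--         if any(key.startswith(p) for p in skip_prefixes):
--             continue
--         if key in tag_to_group:
--             grouped[tag_to_group[key]][key] = val
--         else:
--             grouped["Other"][key] = val
--
--     # Remove empty groups
--     return {g: tags for g, tags in grouped.items() if tags}
-- ===== SOURCE B (Python) =====
-- TAG_GROUPS = {
--     "Date & Time": [
--         "EXIF:DateTimeOriginal", "EXIF:CreateDate", "EXIF:ModifyDate",
--         "EXIF:SubSecDateTimeOriginal", "XMP:DateTimeOriginal", "XMP:CreateDate",
--         "QuickTime:CreateDate", "QuickTime:ModifyDate",
--     ],
--     "GPS": [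
--         "EXIF:GPSLatitude", "EXIF:GPSLongitude", "EXIF:GPSLatitudeRef",
--         "EXIF:GPSLongitudeRef", "EXIF:GPSAltitude", "EXIF:GPSDateStamp",
--         "EXIF:GPSTimeStamp", "XMP:GPSLatitude", "XMP:GPSLongitude",
--         "Composite:GPSPosition",
--     ],
--     "Description": [
--         "EXIF:ImageDescription", "XMP:Description", "XMP:Title",
--         "XMP:Subject", "IPTC:Caption-Abstract", "IPTC:ObjectName",
--     ],
--     "Creator": [
--         "XMP:Creator", "EXIF:Artist", "IPTC:By-line",
--         "XMP:Rights", "EXIF:Copyright",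
--     ],
--     "Camera": [
--         "EXIF:Make", "EXIF:Model", "EXIF:Software",
--         "EXIF:LensModel", "EXIF:FocalLength",
--     ],
--     "Snatched": [
--         "XMP:ImageUniqueID", "EXIF:ImageUniqueID",
--     ],
-- }
--
--
-- def group_tags(flat_tags: dict) -> dict[str, dict]:
--     """Organize flat exiftool output into UI-friendly groups.
--
--     No reverse-lookup dict and no empty-group pruning pass: build each
--     group's dict directly, keeping only the non-empty ones.
--     """
--     out = {}
--     for group, keys in TAG_GROUPS.items():
--         keyset = set(keys)
--         inner = {k: v for k, v in flat_tags.items() if k in keyset}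
--         if inner:
--             out[group] = inner
--     known = {k for keys in TAG_GROUPS.values() for k in keys}
--     other = {k: v for k, v in flat_tags.items()
--              if k not in known and not k.startswith(("SourceFile", "File:", "ExifTool:"))}
--     if other:
--         out["Other"] = other
--     return out
-- ===== Notes on version B (the rewrite author's own statement) =====
-- stated objective: simpler
-- what changed: Drops A's reverse-lookup dict, the pre-created empty-group table and the final empty-group pruning pass: B builds each group's dict directly by filtering flat_tags against that group's key set, then builds 'Other' in one pass using the set of all known keys, keeping only non-empty groups as it goes.
import Mathlib
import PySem

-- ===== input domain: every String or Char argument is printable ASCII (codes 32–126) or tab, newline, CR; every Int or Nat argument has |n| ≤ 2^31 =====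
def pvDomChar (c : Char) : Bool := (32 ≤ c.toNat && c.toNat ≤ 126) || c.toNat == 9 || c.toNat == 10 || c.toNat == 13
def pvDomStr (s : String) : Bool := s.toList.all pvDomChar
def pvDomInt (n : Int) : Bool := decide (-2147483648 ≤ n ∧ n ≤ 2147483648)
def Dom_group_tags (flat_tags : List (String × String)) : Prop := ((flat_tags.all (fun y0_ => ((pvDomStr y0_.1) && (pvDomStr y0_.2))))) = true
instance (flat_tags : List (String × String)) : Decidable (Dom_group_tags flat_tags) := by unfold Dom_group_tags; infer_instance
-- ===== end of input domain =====

-- B drops A's reverse-lookup dict, empty-group table and pruning pass; builds each group by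
-- filtering flat_tags directly (objective: simpler; return value only — neither mutates its argument).

-- the module constant TAG_GROUPS (shared data, used by both ports)
def tagGroups : List (String × List String) := [
  ("Date & Time", ["EXIF:DateTimeOriginal", "EXIF:CreateDate", "EXIF:ModifyDate",
    "EXIF:SubSecDateTimeOriginal", "XMP:DateTimeOriginal", "XMP:CreateDate",
    "QuickTime:CreateDate", "QuickTime:ModifyDate"]),
  ("GPS", ["EXIF:GPSLatitude", "EXIF:GPSLongitude", "EXIF:GPSLatitudeRef",
    "EXIF:GPSLongitudeRef", "EXIF:GPSAltitude", "EXIF:GPSDateStamp",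
    "EXIF:GPSTimeStamp", "XMP:GPSLatitude", "XMP:GPSLongitude",
    "Composite:GPSPosition"]),
  ("Description", ["EXIF:ImageDescription", "XMP:Description", "XMP:Title",
    "XMP:Subject", "IPTC:Caption-Abstract", "IPTC:ObjectName"]),
  ("Creator", ["XMP:Creator", "EXIF:Artist", "IPTC:By-line",
    "XMP:Rights", "EXIF:Copyright"]),
  ("Camera", ["EXIF:Make", "EXIF:Model", "EXIF:Software",
    "EXIF:LensModel", "EXIF:FocalLength"]),
  ("Snatched", ["XMP:ImageUniqueID", "EXIF:ImageUniqueID"])]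

-- ===== PORT A =====
def group_tags (flat_tags : List (String × String)) : List (String × List (String × String)) :=
  -- tag_to_group = {}; for group, keys in TAG_GROUPS.items(): for k in keys: tag_to_group[k] = group
  let tag_to_group : PySem.Dict String String :=
    tagGroups.foldl (fun d p => p.2.foldl (fun d k => d.insert k p.1) d) PySem.Dict.empty
  -- grouped = {g: {} for g in TAG_GROUPS}; grouped["Other"] = {}
  let grouped : PySem.Dict String (PySem.Dict String String) :=
    tagGroups.foldl (fun d p => d.insert p.1 PySem.Dict.empty) PySem.Dict.empty
  let grouped := grouped.insert "Other" (PySem.Dict.empty)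
  let skip_prefixes : List String := ["SourceFile", "File:", "ExifTool:"]
  -- for key, val in flat_tags.items(): …
  let grouped := flat_tags.foldl (fun gd kv =>
    if skip_prefixes.any (fun p => PySem.Str.startswith kv.1 p) then gd
    else
      match tag_to_group.get? kv.1 with
      | some g => gd.insert g ((gd.getD g PySem.Dict.empty).insert kv.1 kv.2)
      | none   => gd.insert "Other" ((gd.getD "Other" PySem.Dict.empty).insert kv.1 kv.2)) grouped
  -- return {g: tags for g, tags in grouped.items() if tags}
  (grouped.items.filter (fun q => !q.2.items.isEmpty)).map (fun q => (q.1, q.2.items))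

-- ===== PORT B =====
def group_tags_alt (flat_tags : List (String × String)) : List (String × List (String × String)) :=
  -- for group, keys in TAG_GROUPS.items(): inner = {k: v for k, v in flat_tags.items() if k in set(keys)}
  let out : List (String × List (String × String)) :=
    tagGroups.foldl (fun out p =>
      let keyset := PySem.Set.ofList p.2
      let inner := flat_tags.filter (fun kv => keyset.contains kv.1)
      if inner.isEmpty then out else out ++ [(p.1, inner)]) []
  -- known = {k for keys in TAG_GROUPS.values() for k in keys}
  let known := PySem.Set.ofList (tagGroups.flatMap (·.2))
  let other := flat_tags.filter (fun kv =>
    !known.contains kv.1 &&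
    !(["SourceFile", "File:", "ExifTool:"].any (fun pre => PySem.Str.startswith kv.1 pre)))
  if other.isEmpty then out else out ++ [("Other", other)]

-- ===== PRECONDITION & SPEC =====
-- Pre_ excludes association lists with a duplicated key: they do not represent any Python dict
-- argument (A's parameter is a dict, whose keys are unique), so neither behaviour is A's.
def Pre_group_tags (flat_tags : List (String × String)) : Prop :=
  (flat_tags.map Prod.fst).Nodup
instance (flat_tags : List (String × String)) : Decidable (Pre_group_tags flat_tags) := by unfold Pre_group_tags; infer_instance

def pvWitness_group_tags : (List (String × String)) :=
  [("EXIF:Make", "Canon"), ("Foo", "1"), ("File:X", "y"), ("XMP:CreateDate", "d")]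

def Spec_group_tags (flat_tags : List (String × String)) (out : List (String × List (String × String))) : Prop := out = group_tags_alt flat_tags
instance (flat_tags : List (String × String)) (out : List (String × List (String × String))) : Decidable (Spec_group_tags flat_tags out) := by unfold Spec_group_tags; infer_instance

-- ===== CLAIM (what is proved, stated in full; the proofs are below) =====
def Claim_equal_group_tags : Prop := ∀ (flat_tags : List (String × String)), Dom_group_tags flat_tags → Pre_group_tags flat_tags → Spec_group_tags flat_tags (group_tags flat_tags)

-- ===== LEMMAS AND PROOFS =====

def pvSkip (k : String) : Bool :=
  ["SourceFile", "File:", "ExifTool:"].any (fun p => PySem.Str.startswith k p)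
def pvT2GList : List (String × String) := tagGroups.flatMap (fun p => p.2.map (fun k => (k, p.1)))
def pvT2G : PySem.Dict String String := PySem.Dict.mk pvT2GList
def pvCls (k : String) : Option String :=
  if pvSkip k then none else some ((pvT2G.get? k).getD "Other")
def pvSel (g : String) (pre : List (String × String)) : List (String × String) :=
  pre.filter (fun kv => pvCls kv.1 == some g)
def pvNames : List String := tagGroups.map Prod.fst ++ ["Other"]
def pvState (pre : List (String × String)) : PySem.Dict String (PySem.Dict String String) :=
  PySem.Dict.mk (pvNames.map (fun g => (g, PySem.Dict.mk (pvSel g pre))))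

lemma pv_names_nodup : pvNames.Nodup := by decide
lemma pv_t2g_keys_nodup : pvT2G.keys.Nodup := by decide
lemma pv_pair_fun : ∀ p ∈ tagGroups, ∀ q ∈ tagGroups, p.1 = q.1 → p.2 = q.2 := by decide
lemma pv_not_skip : ∀ p ∈ tagGroups, ∀ k ∈ p.2, pvSkip k = false := by decide
lemma pv_vals_ne_other : ∀ q ∈ pvT2GList, q.2 ≠ "Other" := by decide
lemma pv_names_ne_other : ∀ p ∈ tagGroups, p.1 ≠ "Other" := by decide
lemma pv_mem_t2g (k g : String) :
    (k, g) ∈ pvT2GList ↔ ∃ p ∈ tagGroups, p.1 = g ∧ k ∈ p.2 := by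
  simp [pvT2GList, List.mem_flatMap, List.mem_map]

lemma pv_t2g_items : pvT2G.items = pvT2GList := rfl

lemma pv_get?_t2g_some (g : String) (keys : List String) (h : (g, keys) ∈ tagGroups) (k : String) :
    (pvT2G.get? k = some g) ↔ k ∈ keys := by
  rw [PySem.Dict.get?_eq_some_iff_mem_items _ _ _ pv_t2g_keys_nodup, pv_t2g_items, pv_mem_t2g]
  constructor
  · rintro ⟨p, hp, hp1, hk⟩
    have := pv_pair_fun p hp (g, keys) h hp1
    have h2 : p.2 = keys := this
    exact h2 ▸ hk
  · intro hk; exact ⟨(g, keys), h, rfl, hk⟩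

lemma pv_keys_t2g : pvT2G.keys = tagGroups.flatMap (fun p => p.2) := by
  show pvT2GList.map Prod.fst = _
  simp [pvT2GList, List.map_flatMap, List.map_map, Function.comp_def]

lemma pv_get?_t2g_none (k : String) :
    (pvT2G.get? k = none) ↔ k ∉ tagGroups.flatMap (fun p => p.2) := by
  rw [PySem.Dict.get?_eq_none_iff_not_mem_keys, pv_keys_t2g]
lemma pv_clsA (g : String) (keys : List String) (h : (g, keys) ∈ tagGroups) (k : String) :
    (pvCls k == some g) = (PySem.Set.ofList keys).contains k := by
  have hco : (PySem.Set.ofList keys).contains k = decide (k ∈ keys) := by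
    by_cases hk : k ∈ keys <;> simp [hk, PySem.Set.mem_ofList]
  rw [hco]
  unfold pvCls
  by_cases hs : pvSkip k
  · simp only [hs, if_true]
    have hns : k ∉ keys := fun hk => by
      have := pv_not_skip (g, keys) h k hk
      rw [this] at hs; exact Bool.false_ne_true hs
    simp [hns]
  · simp only [hs, if_false, Bool.false_eq_true]
    by_cases hk : k ∈ keys
    · have := (pv_get?_t2g_some g keys h k).mpr hk
      simp [this, hk]
    · simp only [hk, decide_false]
      rw [Bool.eq_false_iff]
      intro heq
      rw [beq_iff_eq, Option.some_inj] at heq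
      cases hg : pvT2G.get? k with
      | none =>
        rw [hg] at heq
        simp at heq
        exact pv_names_ne_other (g, keys) h heq.symm
      | some g' =>
        rw [hg] at heq
        simp at heq
        rw [heq] at hg
        exact hk ((pv_get?_t2g_some _ keys h k).mp hg)

lemma pv_clsOther (k : String) :
    (pvCls k == some "Other")
    = (!(PySem.Set.ofList (tagGroups.flatMap (fun p => p.2))).contains k && !pvSkip k) := by
  have hco : (PySem.Set.ofList (tagGroups.flatMap (fun p => p.2))).contains k
      = decide (k ∈ tagGroups.flatMap (fun p => p.2)) := by
    by_cases hk : k ∈ tagGroups.flatMap (fun p => p.2) <;> simp [hk, PySem.Set.mem_ofList]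
  rw [hco]
  unfold pvCls
  by_cases hs : pvSkip k
  · simp [hs]
  · simp only [hs, if_false, Bool.false_eq_true, Bool.not_false, Bool.and_true]
    by_cases hk : k ∈ tagGroups.flatMap (fun p => p.2)
    · simp only [hk, decide_true, Bool.not_true]
      rw [Bool.eq_false_iff]
      intro heq
      rw [beq_iff_eq, Option.some_inj] at heq
      cases hg : pvT2G.get? k with
      | none => exact ((pv_get?_t2g_none k).mp hg) hk
      | some g' =>
        rw [hg] at heq
        simp at heq
        rw [heq] at hg
        have : (k, "Other") ∈ pvT2GList :=
          (PySem.Dict.get?_eq_some_iff_mem_items _ _ _ pv_t2g_keys_nodup).mp hg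
        exact pv_vals_ne_other _ this rfl
    · have := (pv_get?_t2g_none k).mpr hk
      simp [hk, this]
lemma pv_sel_append_of_ne (g : String) (pre : List (String × String)) (kv : String × String)
    (h : ¬ (pvCls kv.1 == some g) = true) : pvSel g (pre ++ [kv]) = pvSel g pre := by
  unfold pvSel
  rw [List.filter_append]
  simp [List.filter, h]

lemma pv_sel_append_self (g : String) (pre : List (String × String)) (kv : String × String)
    (h : (pvCls kv.1 == some g) = true) : pvSel g (pre ++ [kv]) = pvSel g pre ++ [kv] := by
  unfold pvSel
  rw [List.filter_append]
  simp [List.filter, h]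

lemma pv_state_items (pre : List (String × String)) :
    (pvState pre).items = pvNames.map (fun g => (g, PySem.Dict.mk (pvSel g pre))) := rfl

lemma pv_state_keys (pre : List (String × String)) : (pvState pre).keys = pvNames := by
  unfold pvState
  rw [PySem.Dict.keys_mk, List.map_map]
  exact List.map_id' _

lemma pv_state_getD (pre : List (String × String)) (g : String) (hg : g ∈ pvNames) :
    (pvState pre).getD g PySem.Dict.empty = PySem.Dict.mk (pvSel g pre) := by
  apply PySem.Dict.getD_of_mem_items
  · rw [pv_state_items]
    exact List.mem_map_of_mem hg
  · rw [pv_state_keys]; exact pv_names_nodup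

lemma pv_stepSkip (pre : List (String × String)) (kv : String × String)
    (h : pvCls kv.1 = none) : pvState (pre ++ [kv]) = pvState pre := by
  unfold pvState
  congr 1
  apply List.map_congr_left
  intro g _
  rw [pv_sel_append_of_ne g pre kv (by simp [h])]
lemma pv_stepA (pre : List (String × String)) (kv : String × String) (g0 : String)
    (hg : g0 ∈ pvNames) (hcls : pvCls kv.1 = some g0) (hk : kv.1 ∉ pre.map Prod.fst) :
    (pvState pre).insert g0 (((pvState pre).getD g0 PySem.Dict.empty).insert kv.1 kv.2)
    = pvState (pre ++ [kv]) := by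
  rw [pv_state_getD pre g0 hg]
  have hnc : (PySem.Dict.mk (pvSel g0 pre)).contains kv.1 = false := by
    rw [PySem.Dict.contains_mk]
    rw [List.any_eq_false]
    intro q hq hq1
    rw [beq_iff_eq] at hq1
    exact hk (hq1 ▸ List.mem_map_of_mem (List.mem_of_mem_filter hq))
  have hinner : (PySem.Dict.mk (pvSel g0 pre)).insert kv.1 kv.2
      = PySem.Dict.mk (pvSel g0 pre ++ [kv]) := by
    apply PySem.Dict.ext
    rw [PySem.Dict.items_insert_of_not_contains _ _ hnc]
  rw [hinner]
  have hc : (pvState pre).contains g0 = true := by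
    rw [← Bool.not_eq_false]
    intro hcf
    have : g0 ∉ (pvState pre).keys := by
      rw [← Bool.not_eq_true] at hcf
      exact fun hm => hcf ((PySem.Dict.contains_iff_mem_keys _ _).mpr hm)
    rw [pv_state_keys] at this
    exact this hg
  apply PySem.Dict.ext
  rw [PySem.Dict.items_insert_of_contains _ _ hc]
  rw [pv_state_items, pv_state_items, List.map_map]
  apply List.map_congr_left
  intro g _
  by_cases hgg : g = g0
  · subst hgg
    simp only [Function.comp_def, beq_self_eq_true, if_true]
    rw [pv_sel_append_self g pre kv (by simp [hcls])]
  · have hne : ¬ (pvCls kv.1 == some g) = true := by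
      rw [hcls]
      simp only [beq_iff_eq, Option.some_inj]
      exact fun h => hgg h.symm
    simp only [Function.comp_def]
    rw [if_neg (by simp [hgg])]
    rw [pv_sel_append_of_ne g pre kv hne]
lemma pv_loopA (l pre : List (String × String)) (h : ((pre ++ l).map Prod.fst).Nodup) :
    l.foldl (fun gd kv =>
      if pvSkip kv.1 then gd
      else
        match pvT2G.get? kv.1 with
        | some g => gd.insert g ((gd.getD g PySem.Dict.empty).insert kv.1 kv.2)
        | none   => gd.insert "Other" ((gd.getD "Other" PySem.Dict.empty).insert kv.1 kv.2))
      (pvState pre)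
    = pvState (pre ++ l) := by
  induction l generalizing pre with
  | nil => simp
  | cons kv rest ih =>
    rw [List.foldl_cons]
    have hk : kv.1 ∉ pre.map Prod.fst := by
      intro hmem
      rw [List.map_append, List.nodup_append] at h
      have := h.2.2 kv.1 hmem
      simp at this
    have hstep :
        (if pvSkip kv.1 then pvState pre
         else
          match pvT2G.get? kv.1 with
          | some g => (pvState pre).insert g (((pvState pre).getD g PySem.Dict.empty).insert kv.1 kv.2)
          | none   => (pvState pre).insert "Other" (((pvState pre).getD "Other" PySem.Dict.empty).insert kv.1 kv.2))
        = pvState (pre ++ [kv]) := by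
      by_cases hs : pvSkip kv.1
      · rw [if_pos hs, pv_stepSkip pre kv (by unfold pvCls; simp [hs])]
      · rw [if_neg hs]
        cases hg : pvT2G.get? kv.1 with
        | some g =>
          have hgmem : g ∈ pvNames := by
            have hm : (kv.1, g) ∈ pvT2GList :=
              (PySem.Dict.get?_eq_some_iff_mem_items _ _ _ pv_t2g_keys_nodup).mp hg
            rcases (pv_mem_t2g kv.1 g).mp hm with ⟨p, hp, hp1, _⟩
            unfold pvNames
            exact List.mem_append_left _ (hp1 ▸ List.mem_map_of_mem hp)
          exact pv_stepA pre kv g hgmem (by unfold pvCls; simp [hs, hg]) hk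
        | none =>
          exact pv_stepA pre kv "Other" (by decide) (by unfold pvCls; simp [hs, hg]) hk
    rw [hstep, ih (pre ++ [kv]) (by simpa using h)]
    simp

lemma pv_projA (names : List String) (sel : String → List (String × String)) :
    ((names.map (fun g => (g, PySem.Dict.mk (sel g)))).filter
        (fun q => !q.2.items.isEmpty)).map (fun q => (q.1, q.2.items))
    = (names.filter (fun g => !(sel g).isEmpty)).map (fun g => (g, sel g)) := by
  rw [List.filter_map, List.map_map]
  rfl
def pvOther (kv : String × String) : Bool :=
  !(PySem.Set.ofList (tagGroups.flatMap (fun p => p.2))).contains kv.1 && !pvSkip kv.1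

lemma pv_foldl_skip_if {α β : Type} (c : α → Bool) (f : α → β) (l : List α) :
    l.foldl (fun acc x => if c x then acc else acc ++ [f x]) [] = (l.filter (fun x => !c x)).map f := by
  have hb : (fun (acc : List β) (x : α) => if c x then acc else acc ++ [f x])
      = (fun acc x => if (!c x) then acc ++ [f x] else acc) := by
    funext acc x
    cases hc : c x
    · simp
    · simp
  rw [hb, PySem.List.foldl_append_if]
  simp

set_option maxRecDepth 100000 in
lemma pv_hA (flat : List (String × String)) (hpre : (flat.map Prod.fst).Nodup) :
    group_tags flat
    = (pvNames.filter (fun g => !(pvSel g flat).isEmpty)).map (fun g => (g, pvSel g flat)) := by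
  show ((flat.foldl (fun gd kv =>
      if pvSkip kv.1 then gd
      else
        match pvT2G.get? kv.1 with
        | some g => gd.insert g ((gd.getD g PySem.Dict.empty).insert kv.1 kv.2)
        | none   => gd.insert "Other" ((gd.getD "Other" PySem.Dict.empty).insert kv.1 kv.2))
      (pvState [])).items.filter (fun q => !q.2.items.isEmpty)).map (fun q => (q.1, q.2.items)) = _
  rw [pv_loopA flat [] (by simpa using hpre)]
  rw [List.nil_append, pv_state_items]
  exact pv_projA pvNames (fun g => pvSel g flat)

set_option maxRecDepth 100000 in
lemma pv_hB (flat : List (String × String)) :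
    group_tags_alt flat
    = (tagGroups.filter
        (fun p => !(flat.filter (fun kv => (PySem.Set.ofList p.2).contains kv.1)).isEmpty)).map
        (fun p => (p.1, flat.filter (fun kv => (PySem.Set.ofList p.2).contains kv.1)))
      ++ (if (flat.filter pvOther).isEmpty then [] else [("Other", flat.filter pvOther)]) := by
  have hfold := pv_foldl_skip_if
      (fun p => (flat.filter (fun kv => (PySem.Set.ofList p.2).contains kv.1)).isEmpty)
      (fun p : String × List String => (p.1, flat.filter (fun kv => (PySem.Set.ofList p.2).contains kv.1)))
      tagGroups
  show (if (flat.filter pvOther).isEmpty then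
          tagGroups.foldl (fun out p =>
            if (flat.filter (fun kv => (PySem.Set.ofList p.2).contains kv.1)).isEmpty then out
            else out ++ [(p.1, flat.filter (fun kv => (PySem.Set.ofList p.2).contains kv.1))]) []
        else
          tagGroups.foldl (fun out p =>
            if (flat.filter (fun kv => (PySem.Set.ofList p.2).contains kv.1)).isEmpty then out
            else out ++ [(p.1, flat.filter (fun kv => (PySem.Set.ofList p.2).contains kv.1))]) []
          ++ [("Other", flat.filter pvOther)]) = _
  by_cases ho : (flat.filter pvOther).isEmpty
  · rw [if_pos ho, hfold, if_pos ho, List.append_nil]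
  · rw [if_neg ho, hfold, if_neg ho]
lemma pv_names_def : pvNames = tagGroups.map Prod.fst ++ ["Other"] := rfl

lemma pv_sel_group (flat : List (String × String)) (p : String × List String) (hp : p ∈ tagGroups) :
    pvSel p.1 flat = flat.filter (fun kv => (PySem.Set.ofList p.2).contains kv.1) := by
  apply List.filter_congr
  intro kv _
  exact pv_clsA p.1 p.2 (by obtain ⟨a, b⟩ := p; exact hp) kv.1

lemma pv_sel_other (flat : List (String × String)) :
    pvSel "Other" flat = flat.filter pvOther := by
  apply List.filter_congr
  intro kv _
  rw [pv_clsOther]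
  rfl

-- ===== VERDICT (by name: the statement is the Claim_ definition above) =====
theorem group_tags_spec : Claim_equal_group_tags := by
  intro flat _ hpre
  unfold Spec_group_tags
  rw [pv_hA flat hpre, pv_hB flat, pv_names_def, List.filter_append, List.map_append]
  congr 1
  · rw [List.filter_map, List.map_map]
    have hfil : (tagGroups.filter ((fun g => !(pvSel g flat).isEmpty) ∘ Prod.fst))
        = tagGroups.filter
            (fun p => !(flat.filter (fun kv => (PySem.Set.ofList p.2).contains kv.1)).isEmpty) := by
      apply List.filter_congr
      intro p hp
      simp only [Function.comp_def]
      rw [pv_sel_group flat p hp]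
    rw [hfil]
    apply List.map_congr_left
    intro p hp
    simp only [Function.comp_def]
    rw [pv_sel_group flat p (List.mem_of_mem_filter hp)]
  · by_cases ho : (flat.filter pvOther).isEmpty
    · rw [if_pos ho]
      simp [List.filter, pv_sel_other, ho]
    · rw [if_neg ho]
      simp [List.filter, pv_sel_other, ho]
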